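-- pv_equiv track=rewrite | github.com/khalishaadzra/SwarnaNusa_PI_Kel3 | crawling/scrapper_tarian_v2.py | detect_region
-- ===== SOURCE A (Python) =====
-- def detect_region(text: str, title: str) -> str:
--     """Deteksi asal daerah dengan keyword yang lebih lengkap"""
--     mapping = {
--         'Aceh': ['aceh', 'gayo', 'alas', 'seudati', 'saman', 'ranup lampuan', 'likok pulo'],
--         'Sumatera Utara': ['batak', 'karo', 'toba', 'mandailing', 'nias',
--                            'sumatera utara', 'tapanuli', 'tor-tor', 'sigale', 'serampang'],
--         'Sumatera Barat': ['minangkabau', 'minang', 'sumatera barat',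
--                            'padang', 'piring', 'payung', 'pasambahan', 'randai', 'indang'],
--         'Riau': ['riau', 'melayu riau', 'zapin', 'joget', 'mak inang'],
--         'Kepulauan Riau': ['kepulauan riau', 'kepri'],
--         'Jambi': ['jambi', 'sekapur sirih', 'batanghari'],
--         'Sumatera Selatan': ['palembang', 'sumatera selatan', 'sriwijaya',
--                              'gending sriwijaya', 'tanggai', 'tenun songket'],
--         'Bengkulu': ['bengkulu', 'rejang', 'andun'],
--         'Lampung': ['lampung', 'bedana', 'melinting', 'sigeh', 'pengunten'],
--         'Bangka Belitung': ['bangka', 'belitung'],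
--         'DKI Jakarta': ['jakarta', 'betawi', 'yapong', 'topeng betawi',
--                         'ondel', 'cokek'],
--         'Jawa Barat': ['sunda', 'jawa barat', 'cirebon', 'bandung',
--                        'priangan', 'jaipongan', 'merak', 'ketuk tilu',
--                        'sintren', 'ronggeng', 'topeng cirebon'],
--         'Banten': ['banten', 'rampak bedug', 'saman gaya banten'],
--         'Jawa Tengah': ['jawa tengah', 'surakarta', 'solo', 'semarang',
--                         'banyumas', 'wonosobo', 'purworejo', 'dolalak',
--                         'lengger', 'angguk', 'topeng ireng'],
--         'DI Yogyakarta': ['yogyakarta', 'jogja', 'jogjakarta', 'keraton yogya',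
--                           'serimpi', 'gambyong', 'bedhaya', 'bondan', 'golek'],
--         'Jawa Timur': ['jawa timur', 'surabaya', 'ponorogo', 'banyuwangi',
--                        'madura', 'malang', 'kediri', 'reog', 'gandrung',
--                        'remo', 'ludruk', 'jaranan', 'jaran kepang'],
--         'Bali': ['bali', 'balinese', 'pendet', 'kecak', 'legong', 'barong',
--                  'sanghyang', 'baris', 'janger', 'rejang', 'gambuh', 'joged bumbung'],
--         'Nusa Tenggara Barat': ['ntb', 'lombok', 'sumbawa', 'bima', 'sasak',
--                                 'gendang beleq', 'gandrung lombok'],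
--         'Nusa Tenggara Timur': ['ntt', 'flores', 'sumba', 'timor', 'manggarai',
--                                 'ende', 'sikka', 'caci', 'likurai', 'lego-lego'],
--         'Kalimantan Barat': ['kalimantan barat', 'kalbar', 'pontianak',
--                              'monong', 'zapin melayu', 'rodat'],
--         'Kalimantan Tengah': ['kalimantan tengah', 'kalteng', 'palangkaraya',
--                               'dayak ngaju', 'tambun', 'balean dadas'],
--         'Kalimantan Selatan': ['kalimantan selatan', 'kalsel', 'banjar',
--                                'banjarmasin', 'baksa kembang', 'radap rahayu'],
--         'Kalimantan Timur': ['kalimantan timur', 'kaltim', 'kutai',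
--                              'samarinda', 'dayak', 'hudoq', 'kancet',
--                              'gong', 'enggang', 'belian'],
--         'Kalimantan Utara': ['kalimantan utara', 'kaltara', 'jepen', 'tidung'],
--         'Sulawesi Utara': ['sulawesi utara', 'minahasa', 'manado',
--                            'maengket', 'kabasaran', 'polo palo'],
--         'Gorontalo': ['gorontalo', 'saronde', 'tidi'],
--         'Sulawesi Tengah': ['sulawesi tengah', 'sulteng', 'palu', 'dero',
--                             'lulo', 'lumense', 'pamonte'],
--         'Sulawesi Barat': ['sulawesi barat', 'sulbar', 'mamuju', 'patuddu'],
--         'Sulawesi Selatan': ['sulawesi selatan', 'sulsel', 'makassar',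
--                              'bugis', 'toraja', 'gowa', 'pakarena',
--                              'bosara', 'pajoge', 'kipas'],
--         'Sulawesi Tenggara': ['sulawesi tenggara', 'sultra', 'kendari',
--                               'buton', 'lulo', 'dinggu'],
--         'Maluku': ['maluku', 'ambon', 'cakalele', 'lenso', 'bambu gila'],
--         'Maluku Utara': ['maluku utara', 'ternate', 'tidore', 'saureka'],
--         'Papua Barat': ['papua barat', 'manokwari', 'fak-fak'],
--         'Papua': ['papua', 'irian', 'jayapura', 'asmat', 'dani', 'sentani',
--                   'yospan', 'sajojo', 'perang', 'musyoh'],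
--     }
--
--     combined = f"{title} {text}".lower()
--
--     # Scoring system
--     matches = []
--     for region, keywords in mapping.items():
--         score = sum(combined.count(kw) for kw in keywords)
--         if score > 0:
--             matches.append((region, score))
--
--     if matches:
--         matches.sort(key=lambda x: x[1], reverse=True)
--         return matches[0][0]
--
--     return "Indonesia"
-- ===== SOURCE B (Python) =====
-- # B: inverted keyword->region index, one dict-accumulation pass, then a streaming argmax
-- # over the seeded dict (mapping order), instead of A's per-region sum + matches list + sort.
-- _KW_REGION = [
--     ('aceh', 'Aceh'),
--     ('gayo', 'Aceh'),
--     ('alas', 'Aceh'),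
--     ('seudati', 'Aceh'),
--     ('saman', 'Aceh'),
--     ('ranup lampuan', 'Aceh'),
--     ('likok pulo', 'Aceh'),
--     ('batak', 'Sumatera Utara'),
--     ('karo', 'Sumatera Utara'),
--     ('toba', 'Sumatera Utara'),
--     ('mandailing', 'Sumatera Utara'),
--     ('nias', 'Sumatera Utara'),
--     ('sumatera utara', 'Sumatera Utara'),
--     ('tapanuli', 'Sumatera Utara'),
--     ('tor-tor', 'Sumatera Utara'),
--     ('sigale', 'Sumatera Utara'),
--     ('serampang', 'Sumatera Utara'),
--     ('minangkabau', 'Sumatera Barat'),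
--     ('minang', 'Sumatera Barat'),
--     ('sumatera barat', 'Sumatera Barat'),
--     ('padang', 'Sumatera Barat'),
--     ('piring', 'Sumatera Barat'),
--     ('payung', 'Sumatera Barat'),
--     ('pasambahan', 'Sumatera Barat'),
--     ('randai', 'Sumatera Barat'),
--     ('indang', 'Sumatera Barat'),
--     ('riau', 'Riau'),
--     ('melayu riau', 'Riau'),
--     ('zapin', 'Riau'),
--     ('joget', 'Riau'),
--     ('mak inang', 'Riau'),
--     ('kepulauan riau', 'Kepulauan Riau'),
--     ('kepri', 'Kepulauan Riau'),
--     ('jambi', 'Jambi'),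
--     ('sekapur sirih', 'Jambi'),
--     ('batanghari', 'Jambi'),
--     ('palembang', 'Sumatera Selatan'),
--     ('sumatera selatan', 'Sumatera Selatan'),
--     ('sriwijaya', 'Sumatera Selatan'),
--     ('gending sriwijaya', 'Sumatera Selatan'),
--     ('tanggai', 'Sumatera Selatan'),
--     ('tenun songket', 'Sumatera Selatan'),
--     ('bengkulu', 'Bengkulu'),
--     ('rejang', 'Bengkulu'),
--     ('andun', 'Bengkulu'),
--     ('lampung', 'Lampung'),
--     ('bedana', 'Lampung'),
--     ('melinting', 'Lampung'),
--     ('sigeh', 'Lampung'),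
--     ('pengunten', 'Lampung'),
--     ('bangka', 'Bangka Belitung'),
--     ('belitung', 'Bangka Belitung'),
--     ('jakarta', 'DKI Jakarta'),
--     ('betawi', 'DKI Jakarta'),
--     ('yapong', 'DKI Jakarta'),
--     ('topeng betawi', 'DKI Jakarta'),
--     ('ondel', 'DKI Jakarta'),
--     ('cokek', 'DKI Jakarta'),
--     ('sunda', 'Jawa Barat'),
--     ('jawa barat', 'Jawa Barat'),
--     ('cirebon', 'Jawa Barat'),
--     ('bandung', 'Jawa Barat'),
--     ('priangan', 'Jawa Barat'),
--     ('jaipongan', 'Jawa Barat'),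
--     ('merak', 'Jawa Barat'),
--     ('ketuk tilu', 'Jawa Barat'),
--     ('sintren', 'Jawa Barat'),
--     ('ronggeng', 'Jawa Barat'),
--     ('topeng cirebon', 'Jawa Barat'),
--     ('banten', 'Banten'),
--     ('rampak bedug', 'Banten'),
--     ('saman gaya banten', 'Banten'),
--     ('jawa tengah', 'Jawa Tengah'),
--     ('surakarta', 'Jawa Tengah'),
--     ('solo', 'Jawa Tengah'),
--     ('semarang', 'Jawa Tengah'),
--     ('banyumas', 'Jawa Tengah'),
--     ('wonosobo', 'Jawa Tengah'),
--     ('purworejo', 'Jawa Tengah'),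
--     ('dolalak', 'Jawa Tengah'),
--     ('lengger', 'Jawa Tengah'),
--     ('angguk', 'Jawa Tengah'),
--     ('topeng ireng', 'Jawa Tengah'),
--     ('yogyakarta', 'DI Yogyakarta'),
--     ('jogja', 'DI Yogyakarta'),
--     ('jogjakarta', 'DI Yogyakarta'),
--     ('keraton yogya', 'DI Yogyakarta'),
--     ('serimpi', 'DI Yogyakarta'),
--     ('gambyong', 'DI Yogyakarta'),
--     ('bedhaya', 'DI Yogyakarta'),
--     ('bondan', 'DI Yogyakarta'),
--     ('golek', 'DI Yogyakarta'),
--     ('jawa timur', 'Jawa Timur'),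
--     ('surabaya', 'Jawa Timur'),
--     ('ponorogo', 'Jawa Timur'),
--     ('banyuwangi', 'Jawa Timur'),
--     ('madura', 'Jawa Timur'),
--     ('malang', 'Jawa Timur'),
--     ('kediri', 'Jawa Timur'),
--     ('reog', 'Jawa Timur'),
--     ('gandrung', 'Jawa Timur'),
--     ('remo', 'Jawa Timur'),
--     ('ludruk', 'Jawa Timur'),
--     ('jaranan', 'Jawa Timur'),
--     ('jaran kepang', 'Jawa Timur'),
--     ('bali', 'Bali'),
--     ('balinese', 'Bali'),
--     ('pendet', 'Bali'),
--     ('kecak', 'Bali'),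
--     ('legong', 'Bali'),
--     ('barong', 'Bali'),
--     ('sanghyang', 'Bali'),
--     ('baris', 'Bali'),
--     ('janger', 'Bali'),
--     ('rejang', 'Bali'),
--     ('gambuh', 'Bali'),
--     ('joged bumbung', 'Bali'),
--     ('ntb', 'Nusa Tenggara Barat'),
--     ('lombok', 'Nusa Tenggara Barat'),
--     ('sumbawa', 'Nusa Tenggara Barat'),
--     ('bima', 'Nusa Tenggara Barat'),
--     ('sasak', 'Nusa Tenggara Barat'),
--     ('gendang beleq', 'Nusa Tenggara Barat'),
--     ('gandrung lombok', 'Nusa Tenggara Barat'),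
--     ('ntt', 'Nusa Tenggara Timur'),
--     ('flores', 'Nusa Tenggara Timur'),
--     ('sumba', 'Nusa Tenggara Timur'),
--     ('timor', 'Nusa Tenggara Timur'),
--     ('manggarai', 'Nusa Tenggara Timur'),
--     ('ende', 'Nusa Tenggara Timur'),
--     ('sikka', 'Nusa Tenggara Timur'),
--     ('caci', 'Nusa Tenggara Timur'),
--     ('likurai', 'Nusa Tenggara Timur'),
--     ('lego-lego', 'Nusa Tenggara Timur'),
--     ('kalimantan barat', 'Kalimantan Barat'),
--     ('kalbar', 'Kalimantan Barat'),
--     ('pontianak', 'Kalimantan Barat'),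
--     ('monong', 'Kalimantan Barat'),
--     ('zapin melayu', 'Kalimantan Barat'),
--     ('rodat', 'Kalimantan Barat'),
--     ('kalimantan tengah', 'Kalimantan Tengah'),
--     ('kalteng', 'Kalimantan Tengah'),
--     ('palangkaraya', 'Kalimantan Tengah'),
--     ('dayak ngaju', 'Kalimantan Tengah'),
--     ('tambun', 'Kalimantan Tengah'),
--     ('balean dadas', 'Kalimantan Tengah'),
--     ('kalimantan selatan', 'Kalimantan Selatan'),
--     ('kalsel', 'Kalimantan Selatan'),
--     ('banjar', 'Kalimantan Selatan'),
--     ('banjarmasin', 'Kalimantan Selatan'),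
--     ('baksa kembang', 'Kalimantan Selatan'),
--     ('radap rahayu', 'Kalimantan Selatan'),
--     ('kalimantan timur', 'Kalimantan Timur'),
--     ('kaltim', 'Kalimantan Timur'),
--     ('kutai', 'Kalimantan Timur'),
--     ('samarinda', 'Kalimantan Timur'),
--     ('dayak', 'Kalimantan Timur'),
--     ('hudoq', 'Kalimantan Timur'),
--     ('kancet', 'Kalimantan Timur'),
--     ('gong', 'Kalimantan Timur'),
--     ('enggang', 'Kalimantan Timur'),
--     ('belian', 'Kalimantan Timur'),
--     ('kalimantan utara', 'Kalimantan Utara'),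
--     ('kaltara', 'Kalimantan Utara'),
--     ('jepen', 'Kalimantan Utara'),
--     ('tidung', 'Kalimantan Utara'),
--     ('sulawesi utara', 'Sulawesi Utara'),
--     ('minahasa', 'Sulawesi Utara'),
--     ('manado', 'Sulawesi Utara'),
--     ('maengket', 'Sulawesi Utara'),
--     ('kabasaran', 'Sulawesi Utara'),
--     ('polo palo', 'Sulawesi Utara'),
--     ('gorontalo', 'Gorontalo'),
--     ('saronde', 'Gorontalo'),
--     ('tidi', 'Gorontalo'),
--     ('sulawesi tengah', 'Sulawesi Tengah'),
--     ('sulteng', 'Sulawesi Tengah'),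
--     ('palu', 'Sulawesi Tengah'),
--     ('dero', 'Sulawesi Tengah'),
--     ('lulo', 'Sulawesi Tengah'),
--     ('lumense', 'Sulawesi Tengah'),
--     ('pamonte', 'Sulawesi Tengah'),
--     ('sulawesi barat', 'Sulawesi Barat'),
--     ('sulbar', 'Sulawesi Barat'),
--     ('mamuju', 'Sulawesi Barat'),
--     ('patuddu', 'Sulawesi Barat'),
--     ('sulawesi selatan', 'Sulawesi Selatan'),
--     ('sulsel', 'Sulawesi Selatan'),
--     ('makassar', 'Sulawesi Selatan'),
--     ('bugis', 'Sulawesi Selatan'),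
--     ('toraja', 'Sulawesi Selatan'),
--     ('gowa', 'Sulawesi Selatan'),
--     ('pakarena', 'Sulawesi Selatan'),
--     ('bosara', 'Sulawesi Selatan'),
--     ('pajoge', 'Sulawesi Selatan'),
--     ('kipas', 'Sulawesi Selatan'),
--     ('sulawesi tenggara', 'Sulawesi Tenggara'),
--     ('sultra', 'Sulawesi Tenggara'),
--     ('kendari', 'Sulawesi Tenggara'),
--     ('buton', 'Sulawesi Tenggara'),
--     ('lulo', 'Sulawesi Tenggara'),
--     ('dinggu', 'Sulawesi Tenggara'),
--     ('maluku', 'Maluku'),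
--     ('ambon', 'Maluku'),
--     ('cakalele', 'Maluku'),
--     ('lenso', 'Maluku'),
--     ('bambu gila', 'Maluku'),
--     ('maluku utara', 'Maluku Utara'),
--     ('ternate', 'Maluku Utara'),
--     ('tidore', 'Maluku Utara'),
--     ('saureka', 'Maluku Utara'),
--     ('papua barat', 'Papua Barat'),
--     ('manokwari', 'Papua Barat'),
--     ('fak-fak', 'Papua Barat'),
--     ('papua', 'Papua'),
--     ('irian', 'Papua'),
--     ('jayapura', 'Papua'),
--     ('asmat', 'Papua'),
--     ('dani', 'Papua'),
--     ('sentani', 'Papua'),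
--     ('yospan', 'Papua'),
--     ('sajojo', 'Papua'),
--     ('perang', 'Papua'),
--     ('musyoh', 'Papua'),
-- ]
--
-- _REGIONS = [
--     'Aceh',
--     'Sumatera Utara',
--     'Sumatera Barat',
--     'Riau',
--     'Kepulauan Riau',
--     'Jambi',
--     'Sumatera Selatan',
--     'Bengkulu',
--     'Lampung',
--     'Bangka Belitung',
--     'DKI Jakarta',
--     'Jawa Barat',
--     'Banten',
--     'Jawa Tengah',
--     'DI Yogyakarta',
--     'Jawa Timur',
--     'Bali',
--     'Nusa Tenggara Barat',
--     'Nusa Tenggara Timur',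
--     'Kalimantan Barat',
--     'Kalimantan Tengah',
--     'Kalimantan Selatan',
--     'Kalimantan Timur',
--     'Kalimantan Utara',
--     'Sulawesi Utara',
--     'Gorontalo',
--     'Sulawesi Tengah',
--     'Sulawesi Barat',
--     'Sulawesi Selatan',
--     'Sulawesi Tenggara',
--     'Maluku',
--     'Maluku Utara',
--     'Papua Barat',
--     'Papua',
-- ]
--
--
-- def detect_region(text: str, title: str) -> str:
--     """Deteksi asal daerah dengan keyword yang lebih lengkap"""
--     combined = f"{title} {text}".lower()
--     # accumulate per-region scores over the flat inverted index
--     scores = dict.fromkeys(_REGIONS, 0)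
--     for kw, region in _KW_REGION:
--         scores[region] += combined.count(kw)
--     # streaming argmax in mapping order: strict '>' reproduces the stable
--     # descending sort's first-maximum tie-break; 0 means no keyword matched
--     best_region, best_score = "Indonesia", 0
--     for region, score in scores.items():
--         if score > best_score:
--             best_region, best_score = region, score
--     return best_region
-- ===== Notes on version B (the rewrite author's own statement) =====
-- stated objective: alternative
-- what changed: B inverts the table into a flat keyword->region index, accumulates per-region scores in one pass into a dict seeded in mapping order, and takes a streaming strict-greater argmax over the dict items, instead of A's per-region count sums collected into a matches list that is stably sorted descending and headed.
import Mathlib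
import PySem

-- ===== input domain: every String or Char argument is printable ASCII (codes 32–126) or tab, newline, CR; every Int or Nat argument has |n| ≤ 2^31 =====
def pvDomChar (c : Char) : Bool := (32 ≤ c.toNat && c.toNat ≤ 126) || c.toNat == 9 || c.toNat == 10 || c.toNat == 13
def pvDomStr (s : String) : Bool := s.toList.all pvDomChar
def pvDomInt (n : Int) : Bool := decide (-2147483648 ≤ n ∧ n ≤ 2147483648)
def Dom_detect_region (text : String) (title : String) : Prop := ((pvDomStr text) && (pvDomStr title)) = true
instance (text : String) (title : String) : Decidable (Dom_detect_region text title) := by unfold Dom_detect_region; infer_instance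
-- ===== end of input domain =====

-- B replaces A's per-region sum + matches list + stable sort with an inverted keyword->region
-- index accumulated into a seeded dict, then a streaming argmax (objective: alternative).

-- ===== PORT A =====
-- A's region -> keywords table
def pvRegionKeywords : List (String × List String) := [
  ("Aceh", ["aceh", "gayo", "alas", "seudati", "saman", "ranup lampuan", "likok pulo"]),
  ("Sumatera Utara", ["batak", "karo", "toba", "mandailing", "nias", "sumatera utara", "tapanuli", "tor-tor", "sigale", "serampang"]),
  ("Sumatera Barat", ["minangkabau", "minang", "sumatera barat", "padang", "piring", "payung", "pasambahan", "randai", "indang"]),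
  ("Riau", ["riau", "melayu riau", "zapin", "joget", "mak inang"]),
  ("Kepulauan Riau", ["kepulauan riau", "kepri"]),
  ("Jambi", ["jambi", "sekapur sirih", "batanghari"]),
  ("Sumatera Selatan", ["palembang", "sumatera selatan", "sriwijaya", "gending sriwijaya", "tanggai", "tenun songket"]),
  ("Bengkulu", ["bengkulu", "rejang", "andun"]),
  ("Lampung", ["lampung", "bedana", "melinting", "sigeh", "pengunten"]),
  ("Bangka Belitung", ["bangka", "belitung"]),
  ("DKI Jakarta", ["jakarta", "betawi", "yapong", "topeng betawi", "ondel", "cokek"]),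
  ("Jawa Barat", ["sunda", "jawa barat", "cirebon", "bandung", "priangan", "jaipongan", "merak", "ketuk tilu", "sintren", "ronggeng", "topeng cirebon"]),
  ("Banten", ["banten", "rampak bedug", "saman gaya banten"]),
  ("Jawa Tengah", ["jawa tengah", "surakarta", "solo", "semarang", "banyumas", "wonosobo", "purworejo", "dolalak", "lengger", "angguk", "topeng ireng"]),
  ("DI Yogyakarta", ["yogyakarta", "jogja", "jogjakarta", "keraton yogya", "serimpi", "gambyong", "bedhaya", "bondan", "golek"]),
  ("Jawa Timur", ["jawa timur", "surabaya", "ponorogo", "banyuwangi", "madura", "malang", "kediri", "reog", "gandrung", "remo", "ludruk", "jaranan", "jaran kepang"]),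
  ("Bali", ["bali", "balinese", "pendet", "kecak", "legong", "barong", "sanghyang", "baris", "janger", "rejang", "gambuh", "joged bumbung"]),
  ("Nusa Tenggara Barat", ["ntb", "lombok", "sumbawa", "bima", "sasak", "gendang beleq", "gandrung lombok"]),
  ("Nusa Tenggara Timur", ["ntt", "flores", "sumba", "timor", "manggarai", "ende", "sikka", "caci", "likurai", "lego-lego"]),
  ("Kalimantan Barat", ["kalimantan barat", "kalbar", "pontianak", "monong", "zapin melayu", "rodat"]),
  ("Kalimantan Tengah", ["kalimantan tengah", "kalteng", "palangkaraya", "dayak ngaju", "tambun", "balean dadas"]),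
  ("Kalimantan Selatan", ["kalimantan selatan", "kalsel", "banjar", "banjarmasin", "baksa kembang", "radap rahayu"]),
  ("Kalimantan Timur", ["kalimantan timur", "kaltim", "kutai", "samarinda", "dayak", "hudoq", "kancet", "gong", "enggang", "belian"]),
  ("Kalimantan Utara", ["kalimantan utara", "kaltara", "jepen", "tidung"]),
  ("Sulawesi Utara", ["sulawesi utara", "minahasa", "manado", "maengket", "kabasaran", "polo palo"]),
  ("Gorontalo", ["gorontalo", "saronde", "tidi"]),
  ("Sulawesi Tengah", ["sulawesi tengah", "sulteng", "palu", "dero", "lulo", "lumense", "pamonte"]),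
  ("Sulawesi Barat", ["sulawesi barat", "sulbar", "mamuju", "patuddu"]),
  ("Sulawesi Selatan", ["sulawesi selatan", "sulsel", "makassar", "bugis", "toraja", "gowa", "pakarena", "bosara", "pajoge", "kipas"]),
  ("Sulawesi Tenggara", ["sulawesi tenggara", "sultra", "kendari", "buton", "lulo", "dinggu"]),
  ("Maluku", ["maluku", "ambon", "cakalele", "lenso", "bambu gila"]),
  ("Maluku Utara", ["maluku utara", "ternate", "tidore", "saureka"]),
  ("Papua Barat", ["papua barat", "manokwari", "fak-fak"]),
  ("Papua", ["papua", "irian", "jayapura", "asmat", "dani", "sentani", "yospan", "sajojo", "perang", "musyoh"])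
]

-- per-region score: sum(combined.count(kw) for kw in keywords)
def pvScore (c : String) (rk : String × List String) : Int :=
  (rk.2.map (fun kw => (PySem.Str.count c kw : Int))).sum

-- A's loop body: append (region, score) when score > 0
def pvAMatches (c : String) : List (String × Int) :=
  pvRegionKeywords.foldl
    (fun acc rk => if pvScore c rk > 0 then acc ++ [(rk.1, pvScore c rk)] else acc) []

-- literal port of A: collect positive (region, score) pairs, stable sort by score
-- descending, return the first; "Indonesia" when no keyword occurs
def detect_region (text : String) (title : String) : String :=
  let combined := PySem.Str.lower (title ++ " " ++ text)
  let matchesL := pvAMatches combined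
  if !matchesL.isEmpty then
    match PySem.List.sorted matchesL (fun x => x.2) true with
    | m :: _ => m.1
    | [] => "Indonesia"   -- unreachable: sorted of a nonempty list is nonempty
  else "Indonesia"

-- ===== PORT B =====
-- B's flat inverted index _KW_REGION and region list _REGIONS
def pvKwRegion : List (String × String) := [
  ("aceh", "Aceh"),
  ("gayo", "Aceh"),
  ("alas", "Aceh"),
  ("seudati", "Aceh"),
  ("saman", "Aceh"),
  ("ranup lampuan", "Aceh"),
  ("likok pulo", "Aceh"),
  ("batak", "Sumatera Utara"),
  ("karo", "Sumatera Utara"),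
  ("toba", "Sumatera Utara"),
  ("mandailing", "Sumatera Utara"),
  ("nias", "Sumatera Utara"),
  ("sumatera utara", "Sumatera Utara"),
  ("tapanuli", "Sumatera Utara"),
  ("tor-tor", "Sumatera Utara"),
  ("sigale", "Sumatera Utara"),
  ("serampang", "Sumatera Utara"),
  ("minangkabau", "Sumatera Barat"),
  ("minang", "Sumatera Barat"),
  ("sumatera barat", "Sumatera Barat"),
  ("padang", "Sumatera Barat"),
  ("piring", "Sumatera Barat"),
  ("payung", "Sumatera Barat"),
  ("pasambahan", "Sumatera Barat"),
  ("randai", "Sumatera Barat"),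
  ("indang", "Sumatera Barat"),
  ("riau", "Riau"),
  ("melayu riau", "Riau"),
  ("zapin", "Riau"),
  ("joget", "Riau"),
  ("mak inang", "Riau"),
  ("kepulauan riau", "Kepulauan Riau"),
  ("kepri", "Kepulauan Riau"),
  ("jambi", "Jambi"),
  ("sekapur sirih", "Jambi"),
  ("batanghari", "Jambi"),
  ("palembang", "Sumatera Selatan"),
  ("sumatera selatan", "Sumatera Selatan"),
  ("sriwijaya", "Sumatera Selatan"),
  ("gending sriwijaya", "Sumatera Selatan"),
  ("tanggai", "Sumatera Selatan"),
  ("tenun songket", "Sumatera Selatan"),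
  ("bengkulu", "Bengkulu"),
  ("rejang", "Bengkulu"),
  ("andun", "Bengkulu"),
  ("lampung", "Lampung"),
  ("bedana", "Lampung"),
  ("melinting", "Lampung"),
  ("sigeh", "Lampung"),
  ("pengunten", "Lampung"),
  ("bangka", "Bangka Belitung"),
  ("belitung", "Bangka Belitung"),
  ("jakarta", "DKI Jakarta"),
  ("betawi", "DKI Jakarta"),
  ("yapong", "DKI Jakarta"),
  ("topeng betawi", "DKI Jakarta"),
  ("ondel", "DKI Jakarta"),
  ("cokek", "DKI Jakarta"),
  ("sunda", "Jawa Barat"),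
  ("jawa barat", "Jawa Barat"),
  ("cirebon", "Jawa Barat"),
  ("bandung", "Jawa Barat"),
  ("priangan", "Jawa Barat"),
  ("jaipongan", "Jawa Barat"),
  ("merak", "Jawa Barat"),
  ("ketuk tilu", "Jawa Barat"),
  ("sintren", "Jawa Barat"),
  ("ronggeng", "Jawa Barat"),
  ("topeng cirebon", "Jawa Barat"),
  ("banten", "Banten"),
  ("rampak bedug", "Banten"),
  ("saman gaya banten", "Banten"),
  ("jawa tengah", "Jawa Tengah"),
  ("surakarta", "Jawa Tengah"),
  ("solo", "Jawa Tengah"),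
  ("semarang", "Jawa Tengah"),
  ("banyumas", "Jawa Tengah"),
  ("wonosobo", "Jawa Tengah"),
  ("purworejo", "Jawa Tengah"),
  ("dolalak", "Jawa Tengah"),
  ("lengger", "Jawa Tengah"),
  ("angguk", "Jawa Tengah"),
  ("topeng ireng", "Jawa Tengah"),
  ("yogyakarta", "DI Yogyakarta"),
  ("jogja", "DI Yogyakarta"),
  ("jogjakarta", "DI Yogyakarta"),
  ("keraton yogya", "DI Yogyakarta"),
  ("serimpi", "DI Yogyakarta"),
  ("gambyong", "DI Yogyakarta"),
  ("bedhaya", "DI Yogyakarta"),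
  ("bondan", "DI Yogyakarta"),
  ("golek", "DI Yogyakarta"),
  ("jawa timur", "Jawa Timur"),
  ("surabaya", "Jawa Timur"),
  ("ponorogo", "Jawa Timur"),
  ("banyuwangi", "Jawa Timur"),
  ("madura", "Jawa Timur"),
  ("malang", "Jawa Timur"),
  ("kediri", "Jawa Timur"),
  ("reog", "Jawa Timur"),
  ("gandrung", "Jawa Timur"),
  ("remo", "Jawa Timur"),
  ("ludruk", "Jawa Timur"),
  ("jaranan", "Jawa Timur"),
  ("jaran kepang", "Jawa Timur"),
  ("bali", "Bali"),
  ("balinese", "Bali"),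
  ("pendet", "Bali"),
  ("kecak", "Bali"),
  ("legong", "Bali"),
  ("barong", "Bali"),
  ("sanghyang", "Bali"),
  ("baris", "Bali"),
  ("janger", "Bali"),
  ("rejang", "Bali"),
  ("gambuh", "Bali"),
  ("joged bumbung", "Bali"),
  ("ntb", "Nusa Tenggara Barat"),
  ("lombok", "Nusa Tenggara Barat"),
  ("sumbawa", "Nusa Tenggara Barat"),
  ("bima", "Nusa Tenggara Barat"),
  ("sasak", "Nusa Tenggara Barat"),
  ("gendang beleq", "Nusa Tenggara Barat"),
  ("gandrung lombok", "Nusa Tenggara Barat"),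
  ("ntt", "Nusa Tenggara Timur"),
  ("flores", "Nusa Tenggara Timur"),
  ("sumba", "Nusa Tenggara Timur"),
  ("timor", "Nusa Tenggara Timur"),
  ("manggarai", "Nusa Tenggara Timur"),
  ("ende", "Nusa Tenggara Timur"),
  ("sikka", "Nusa Tenggara Timur"),
  ("caci", "Nusa Tenggara Timur"),
  ("likurai", "Nusa Tenggara Timur"),
  ("lego-lego", "Nusa Tenggara Timur"),
  ("kalimantan barat", "Kalimantan Barat"),
  ("kalbar", "Kalimantan Barat"),
  ("pontianak", "Kalimantan Barat"),
  ("monong", "Kalimantan Barat"),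
  ("zapin melayu", "Kalimantan Barat"),
  ("rodat", "Kalimantan Barat"),
  ("kalimantan tengah", "Kalimantan Tengah"),
  ("kalteng", "Kalimantan Tengah"),
  ("palangkaraya", "Kalimantan Tengah"),
  ("dayak ngaju", "Kalimantan Tengah"),
  ("tambun", "Kalimantan Tengah"),
  ("balean dadas", "Kalimantan Tengah"),
  ("kalimantan selatan", "Kalimantan Selatan"),
  ("kalsel", "Kalimantan Selatan"),
  ("banjar", "Kalimantan Selatan"),
  ("banjarmasin", "Kalimantan Selatan"),
  ("baksa kembang", "Kalimantan Selatan"),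
  ("radap rahayu", "Kalimantan Selatan"),
  ("kalimantan timur", "Kalimantan Timur"),
  ("kaltim", "Kalimantan Timur"),
  ("kutai", "Kalimantan Timur"),
  ("samarinda", "Kalimantan Timur"),
  ("dayak", "Kalimantan Timur"),
  ("hudoq", "Kalimantan Timur"),
  ("kancet", "Kalimantan Timur"),
  ("gong", "Kalimantan Timur"),
  ("enggang", "Kalimantan Timur"),
  ("belian", "Kalimantan Timur"),
  ("kalimantan utara", "Kalimantan Utara"),
  ("kaltara", "Kalimantan Utara"),
  ("jepen", "Kalimantan Utara"),
  ("tidung", "Kalimantan Utara"),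
  ("sulawesi utara", "Sulawesi Utara"),
  ("minahasa", "Sulawesi Utara"),
  ("manado", "Sulawesi Utara"),
  ("maengket", "Sulawesi Utara"),
  ("kabasaran", "Sulawesi Utara"),
  ("polo palo", "Sulawesi Utara"),
  ("gorontalo", "Gorontalo"),
  ("saronde", "Gorontalo"),
  ("tidi", "Gorontalo"),
  ("sulawesi tengah", "Sulawesi Tengah"),
  ("sulteng", "Sulawesi Tengah"),
  ("palu", "Sulawesi Tengah"),
  ("dero", "Sulawesi Tengah"),
  ("lulo", "Sulawesi Tengah"),
  ("lumense", "Sulawesi Tengah"),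
  ("pamonte", "Sulawesi Tengah"),
  ("sulawesi barat", "Sulawesi Barat"),
  ("sulbar", "Sulawesi Barat"),
  ("mamuju", "Sulawesi Barat"),
  ("patuddu", "Sulawesi Barat"),
  ("sulawesi selatan", "Sulawesi Selatan"),
  ("sulsel", "Sulawesi Selatan"),
  ("makassar", "Sulawesi Selatan"),
  ("bugis", "Sulawesi Selatan"),
  ("toraja", "Sulawesi Selatan"),
  ("gowa", "Sulawesi Selatan"),
  ("pakarena", "Sulawesi Selatan"),
  ("bosara", "Sulawesi Selatan"),
  ("pajoge", "Sulawesi Selatan"),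
  ("kipas", "Sulawesi Selatan"),
  ("sulawesi tenggara", "Sulawesi Tenggara"),
  ("sultra", "Sulawesi Tenggara"),
  ("kendari", "Sulawesi Tenggara"),
  ("buton", "Sulawesi Tenggara"),
  ("lulo", "Sulawesi Tenggara"),
  ("dinggu", "Sulawesi Tenggara"),
  ("maluku", "Maluku"),
  ("ambon", "Maluku"),
  ("cakalele", "Maluku"),
  ("lenso", "Maluku"),
  ("bambu gila", "Maluku"),
  ("maluku utara", "Maluku Utara"),
  ("ternate", "Maluku Utara"),
  ("tidore", "Maluku Utara"),
  ("saureka", "Maluku Utara"),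
  ("papua barat", "Papua Barat"),
  ("manokwari", "Papua Barat"),
  ("fak-fak", "Papua Barat"),
  ("papua", "Papua"),
  ("irian", "Papua"),
  ("jayapura", "Papua"),
  ("asmat", "Papua"),
  ("dani", "Papua"),
  ("sentani", "Papua"),
  ("yospan", "Papua"),
  ("sajojo", "Papua"),
  ("perang", "Papua"),
  ("musyoh", "Papua")
]

def pvRegions : List String := [
  "Aceh",
  "Sumatera Utara",
  "Sumatera Barat",
  "Riau",
  "Kepulauan Riau",
  "Jambi",
  "Sumatera Selatan",
  "Bengkulu",
  "Lampung",
  "Bangka Belitung",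
  "DKI Jakarta",
  "Jawa Barat",
  "Banten",
  "Jawa Tengah",
  "DI Yogyakarta",
  "Jawa Timur",
  "Bali",
  "Nusa Tenggara Barat",
  "Nusa Tenggara Timur",
  "Kalimantan Barat",
  "Kalimantan Tengah",
  "Kalimantan Selatan",
  "Kalimantan Timur",
  "Kalimantan Utara",
  "Sulawesi Utara",
  "Gorontalo",
  "Sulawesi Tengah",
  "Sulawesi Barat",
  "Sulawesi Selatan",
  "Sulawesi Tenggara",
  "Maluku",
  "Maluku Utara",
  "Papua Barat",
  "Papua"
]

-- scores = dict.fromkeys(_REGIONS, 0)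
def pvSeed : PySem.Dict String Int :=
  PySem.Dict.ofList (pvRegions.map (fun r => (r, (0 : Int))))

-- the accumulation pass: for kw, region in _KW_REGION: scores[region] += combined.count(kw)
-- (ported as modify with default 0: every region key is present in the seeded dict)
def pvAccum (c : String) : PySem.Dict String Int :=
  pvKwRegion.foldl
    (fun d p => d.modify p.2 0 (fun v => v + (PySem.Str.count c p.1 : Int))) pvSeed

-- literal port of B: seeded dict accumulation over the flat inverted index, then a
-- streaming argmax over the dict items with strict '>' and default "Indonesia"/0
def detect_region_alt (text : String) (title : String) : String :=
  let combined := PySem.Str.lower (title ++ " " ++ text)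
  let scores := pvAccum combined
  (scores.items.foldl (fun best q => if q.2 > best.2 then q else best) ("Indonesia", 0)).1

-- ===== PRECONDITION & SPEC =====
def Spec_detect_region (text : String) (title : String) (out : String) : Prop := out = detect_region_alt text title
instance (text : String) (title : String) (out : String) : Decidable (Spec_detect_region text title out) := by unfold Spec_detect_region; infer_instance

-- ===== CLAIM (what is proved, stated in full; the proofs are below) =====
def Claim_equal_detect_region : Prop := ∀ (text : String) (title : String), Dom_detect_region text title → Spec_detect_region text title (detect_region text title)

-- ===== LEMMAS AND PROOFS =====

-- one argmax step, on pairs (B's update) and lifted to Option (for A's sort head)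
def pvBStep (b x : String × Int) : String × Int := if x.2 > b.2 then x else b

def pvOStep (o : Option (String × Int)) (x : String × Int) : Option (String × Int) :=
  match o with
  | none => some x
  | some h => if h.2 < x.2 then some x else some h

-- A's append-if loop builds exactly the positive-score entries, in order
theorem pvMatches_eq (c : String) (l : List (String × List String)) (acc : List (String × Int)) :
    l.foldl (fun acc rk => if pvScore c rk > 0 then acc ++ [(rk.1, pvScore c rk)] else acc) acc
      = acc ++ (l.map (fun rk => (rk.1, pvScore c rk))).filter (fun p => decide (0 < p.2)) := by
  induction l generalizing acc with
  | nil => simp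
  | cons x t ih =>
    simp only [List.foldl_cons, List.map_cons, List.filter_cons]
    by_cases h : 0 < pvScore c x
    · simp [h, ih, List.append_assoc]
    · simp [h, ih]

-- head of an insertBy step is the strict-greater argmax step
theorem pvHead_insertBy (x : String × Int) (ys : List (String × Int)) :
    (PySem.List.insertBy (fun a b => decide (b.2 < a.2)) x ys).head? = pvOStep ys.head? x := by
  cases ys with
  | nil => rfl
  | cons y t =>
    simp only [PySem.List.insertBy, pvOStep, List.head?]
    by_cases h : y.2 < x.2 <;> simp [h]

-- head of the insertion-sort fold = Option-argmax fold
theorem pvHead_foldl_insertBy (xs acc : List (String × Int)) :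
    (xs.foldl (fun acc x => PySem.List.insertBy (fun a b => decide (b.2 < a.2)) x acc) acc).head?
      = xs.foldl pvOStep acc.head? := by
  induction xs generalizing acc with
  | nil => rfl
  | cons x t ih => simp only [List.foldl_cons, ih, pvHead_insertBy]

-- once the Option accumulator is some, it is the pair fold
theorem pvOStep_foldl_some (xs : List (String × Int)) (m : String × Int) :
    xs.foldl pvOStep (some m) = some (xs.foldl pvBStep m) := by
  induction xs generalizing m with
  | nil => rfl
  | cons x t ih =>
    have h1 : pvOStep (some m) x = some (pvBStep m x) := by
      simp only [pvOStep, pvBStep, gt_iff_lt]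
      by_cases h : m.2 < x.2 <;> simp [h]
    simp only [List.foldl_cons, h1, ih]

-- entries with non-positive score never change a non-negative best
theorem pvBStep_skip_nonpos (xs : List (String × Int)) (b : String × Int) (hb : 0 ≤ b.2) :
    xs.foldl pvBStep b = (xs.filter (fun p => decide (0 < p.2))).foldl pvBStep b := by
  induction xs generalizing b with
  | nil => rfl
  | cons x t ih =>
    simp only [List.foldl_cons, List.filter_cons]
    by_cases h : 0 < x.2
    · have hb' : 0 ≤ (pvBStep b x).2 := by
        simp only [pvBStep]; split <;> omega
      simp [h, List.foldl_cons, ih _ hb']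
    · have hx : ¬ (x.2 > b.2) := by omega
      simp [h, pvBStep, hx, ih _ hb]

-- A's side: the collect+sort+head computation IS the streaming argmax over the scored table
theorem pvA_eq_argmax (c : String) :
    (if !(pvAMatches c).isEmpty then
      match PySem.List.sorted (pvAMatches c) (fun x => x.2) true with
      | m :: _ => m.1
      | [] => "Indonesia"
    else "Indonesia")
    = ((pvRegionKeywords.map (fun rk => (rk.1, pvScore c rk))).foldl pvBStep ("Indonesia", 0)).1 := by
  have hA : pvAMatches c
      = (pvRegionKeywords.map (fun rk => (rk.1, pvScore c rk))).filter (fun p => decide (0 < p.2)) := by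
    unfold pvAMatches
    simpa using pvMatches_eq c pvRegionKeywords []
  rw [hA]
  set scores := pvRegionKeywords.map (fun rk => (rk.1, pvScore c rk)) with hs
  set ms := scores.filter (fun p => decide (0 < p.2)) with hm
  rw [pvBStep_skip_nonpos scores ("Indonesia", 0) (by norm_num), ← hm]
  cases hms : ms with
  | nil => simp
  | cons m t =>
    have hmpos : 0 < m.2 := by
      have hmem : m ∈ ms := by rw [hms]; exact List.mem_cons_self
      rw [hm] at hmem
      simpa using (List.of_mem_filter hmem)
    have hhead : (PySem.List.sorted (m :: t) (fun x => x.2) true).head?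
        = some (t.foldl pvBStep m) := by
      rw [PySem.List.sorted_rev_eq_foldl_insertBy]
      have hl : (fun (acc : List (String × Int)) x =>
          PySem.List.insertBy (fun a b => decide ((fun x => x.2) b < (fun x => x.2) a)) x acc)
          = fun acc x => PySem.List.insertBy (fun a b => decide (b.2 < a.2)) x acc := rfl
      rw [hl, pvHead_foldl_insertBy]
      simp only [List.head?, List.foldl_cons]
      rw [show pvOStep none m = some m from rfl]
      exact pvOStep_foldl_some t m
    obtain ⟨rest, hrest⟩ : ∃ rest, PySem.List.sorted (m :: t) (fun x => x.2) true
        = (t.foldl pvBStep m) :: rest := by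
      cases hso : PySem.List.sorted (m :: t) (fun x => x.2) true with
      | nil => exact absurd ((PySem.List.sorted_eq_nil_iff _ _ _).1 hso) (by simp)
      | cons r rest =>
        rw [hso] at hhead
        simp only [List.head?, Option.some.injEq] at hhead
        exact ⟨rest, by rw [hhead]⟩
    have hbm : pvBStep ("Indonesia", 0) m = m := by
      simp [pvBStep, gt_iff_lt, hmpos]
    simp only [List.isEmpty_cons, Bool.not_false, hrest, List.foldl_cons, hbm, if_true]

-- the flat inverted index is the flattening of A's table
set_option maxRecDepth 8192 in
set_option maxHeartbeats 2000000 in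
theorem pvFlat_eq : pvKwRegion
    = pvRegionKeywords.flatMap (fun rk => rk.2.map (fun kw => (kw, rk.1))) := by
  rfl

-- the seeded key list is the table's region column
set_option maxRecDepth 8192 in
set_option maxHeartbeats 2000000 in
theorem pvRegions_eq : pvRegions = pvRegionKeywords.map (fun rk => rk.1) := by rfl

-- the += loop over any pair list adds, per key, the counts of the pairs carrying that key
theorem pvGetD_accum (f : String × String → Int) (l : List (String × String))
    (d : PySem.Dict String Int) (r : String) :
    (l.foldl (fun d p => d.modify p.2 0 (fun v => v + f p)) d).getD r 0
      = d.getD r 0 + ((l.filter (fun p => p.2 == r)).map f).sum := by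
  induction l generalizing d with
  | nil => simp
  | cons p t ih =>
    simp only [List.foldl_cons, List.filter_cons, ih]
    by_cases h : p.2 = r
    · subst h
      simp
      ring
    · have hne : (p.2 == r) = false := by simpa using h
      rw [PySem.Dict.getD_modify, if_neg (fun he => h he.symm)]
      simp [hne]

-- per group of the flattened table, the filtered counts sum to an if-guarded group score
theorem pvFlat_filter_sum (c : String) (t : List (String × List String)) (r : String) :
    (((t.flatMap (fun rk => rk.2.map (fun kw => (kw, rk.1)))).filter
        (fun p => p.2 == r)).map (fun p => (PySem.Str.count c p.1 : Int))).sum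
      = (t.map (fun rk => if rk.1 = r then pvScore c rk else 0)).sum := by
  induction t with
  | nil => rfl
  | cons rk t ih =>
    simp only [List.flatMap_cons, List.filter_append, List.map_append, List.sum_append, ih,
      List.map_cons, List.sum_cons]
    congr 1
    by_cases h : rk.1 = r
    · subst h
      simp only [List.filter_map]
      have heq : (List.filter ((fun p => p.2 == rk.1) ∘ fun kw => (kw, rk.1)) rk.2) = rk.2 := by
        apply List.filter_eq_self.2
        intro a _
        simp
      rw [heq]
      simp [pvScore, Function.comp_def]
    · have heq : (List.filter ((fun p => p.2 == r) ∘ fun kw => (kw, rk.1)) rk.2) = [] := by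
        apply List.filter_eq_nil_iff.2
        intro a _
        simpa using h
      simp [List.filter_map, heq, h]

-- with distinct region names, the if-guarded sum at rk.1 is exactly rk's score
theorem pvSum_ite (c : String) (rk : String × List String) (t : List (String × List String))
    (hmem : rk ∈ t) (hnd : (t.map (fun x => x.1)).Nodup) :
    (t.map (fun x => if x.1 = rk.1 then pvScore c x else 0)).sum = pvScore c rk := by
  induction t with
  | nil => cases hmem
  | cons hd tl ih =>
    simp only [List.map_cons, List.nodup_cons, List.sum_cons] at hnd ⊢
    rcases List.mem_cons.1 hmem with h | h
    · subst h
      have hz : ∀ x ∈ tl, (if x.1 = rk.1 then pvScore c x else 0) = 0 := by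
        intro x hx
        by_cases hxy : x.1 = rk.1
        · exact absurd (hxy ▸ List.mem_map_of_mem hx) hnd.1
        · simp [hxy]
      rw [if_pos rfl, List.sum_eq_zero (fun x hx => by
        obtain ⟨y, hy, rfl⟩ := List.mem_map.1 hx
        exact hz y hy), add_zero]
    · have hne : hd.1 ≠ rk.1 := by
        intro he
        apply hnd.1
        rw [he]
        exact List.mem_map_of_mem h
      rw [if_neg hne, ih h hnd.2, zero_add]

-- the seeded dict maps every key to 0 (all stored values are 0, and 0 is the default)
set_option maxRecDepth 8192 in
set_option maxHeartbeats 1000000 in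
theorem pvSeed_getD (r : String) : pvSeed.getD r 0 = 0 := by
  rw [PySem.Dict.getD_eq_get?_getD]
  cases hg : pvSeed.get? r with
  | none => rfl
  | some v =>
    have hmem : (r, v) ∈ pvSeed.items := PySem.Dict.mem_items_of_get?_eq_some _ hg
    have hitems : pvSeed.items = pvRegions.map (fun r => (r, (0 : Int))) := by rfl
    rw [hitems] at hmem
    obtain ⟨x, _, hx⟩ := List.mem_map.1 hmem
    simp only [Prod.mk.injEq] at hx
    simp [← hx.2]

-- the accumulated dict lists exactly A's (region, score) pairs, in table order
set_option maxRecDepth 8192 in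
set_option maxHeartbeats 2000000 in
theorem pvAccum_items (c : String) :
    (pvAccum c).items = pvRegionKeywords.map (fun rk => (rk.1, pvScore c rk)) := by
  have hseedkeys : pvSeed.keys = pvRegions := by rfl
  have hndreg : (pvRegionKeywords.map (fun rk => rk.1)).Nodup := by decide
  have hndseed : pvSeed.keys.Nodup := by rw [hseedkeys, pvRegions_eq]; exact hndreg
  have hkeysub : ∀ p ∈ pvKwRegion, (fun q => q.2) p ∈ pvSeed.keys := by
    rw [hseedkeys, pvFlat_eq, pvRegions_eq]
    intro p hp
    simp only [List.mem_flatMap, List.mem_map] at hp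
    obtain ⟨rk, hrk, kw, _, hkw⟩ := hp
    have hp2 : p.2 = rk.1 := by rw [← hkw]
    exact List.mem_map.2 ⟨rk, hrk, hp2.symm⟩
  have hkeys : (pvAccum c).keys = pvRegions := by
    unfold pvAccum
    rw [PySem.Dict.keys_foldl_modify_key pvKwRegion (fun q => q.2) 0
         (fun _ p v => v + (PySem.Str.count c p.1 : Int)) pvSeed,
       PySem.Set.update_eq_append_filter]
    have hnil : List.filter (fun y => !PySem.Set.contains pvSeed.keys y)
        (PySem.Set.ofList (pvKwRegion.map (fun q => q.2))) = [] := by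
      apply List.filter_eq_nil_iff.2
      intro y hy
      have hyl : y ∈ pvKwRegion.map (fun q => q.2) := by
        simpa using (PySem.Set.mem_ofList _ _).1 hy
      obtain ⟨p, hp, hpy⟩ := List.mem_map.1 hyl
      have hmem : y ∈ pvSeed.keys := hpy ▸ hkeysub p hp
      simpa using hmem
    rw [hnil, List.append_nil, hseedkeys]
  have hnd : (pvAccum c).keys.Nodup := by
    unfold pvAccum
    exact PySem.Dict.nodup_keys_foldl_modify_key pvKwRegion (fun q => q.2) 0
      (fun _ p v => v + (PySem.Str.count c p.1 : Int)) pvSeed hndseed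
  rw [PySem.Dict.items_eq_map_keys (pvAccum c) hnd 0, hkeys, pvRegions_eq, List.map_map]
  apply List.map_congr_left
  intro rk hrk
  have hg : (pvAccum c).getD rk.1 0 = pvScore c rk := by
    unfold pvAccum
    rw [pvGetD_accum (fun p => (PySem.Str.count c p.1 : Int)) pvKwRegion pvSeed rk.1,
        pvSeed_getD, zero_add, pvFlat_eq, pvFlat_filter_sum c pvRegionKeywords rk.1]
    exact pvSum_ite c rk pvRegionKeywords hrk hndreg
  simp [hg]

theorem pvMain (text title : String) : detect_region text title = detect_region_alt text title := by
  unfold detect_region detect_region_alt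
  simp only [pvAccum_items]
  have := pvA_eq_argmax (PySem.Str.lower (title ++ " " ++ text))
  simpa [pvBStep] using this

-- ===== VERDICT (by name: the statement is the Claim_ definition above) =====
theorem detect_region_spec : Claim_equal_detect_region := by
  intro text title _
  unfold Spec_detect_region
  exact pvMain text title
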